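-- pv_equiv track=rewrite | github.com/soykeepgoing/algorithm | boj/implementation/3613.py | split_into_word
-- ===== SOURCE A (Python) =====
-- def is_valid(name):
--     if name[0] == '_':
--         return False
--     if name[-1] == '_':
--         return False
--     return True
--
-- def split_into_word(name):
--
--     if not is_valid(name):
--         return 'Error!', None
--
--     if '_' in name:
--         tmp_words = name.split('_')
--         if '' in tmp_words:
--             return 'Error!', None
--         for tmp_word in tmp_words:
--             for w in tmp_word:
--                 if w.isupper():
--                     return 'Error!', None
--         return 'C++', tmp_words
--     if name[0].islower():
--         pointers = []
--         for i in range(len(name)):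
--             if name[i].isupper():
--                 pointers.append(i)
--
--         tmp_words = []
--         pre_pointer = 0
--         for pointer in pointers:
--             tmp_words.append(name[pre_pointer: pointer])
--             pre_pointer = pointer
--         tmp_words.append(name[pre_pointer:])
--         return 'java', tmp_words
--
--     return 'Error!', None
-- ===== SOURCE B (Python) =====
-- def split_into_word(name):
--     if name.startswith('_') or name.endswith('_'):
--         return 'Error!', None
--     if '_' in name:
--         words = name.split('_')
--         if any(w == '' for w in words) or any(c.isupper() for w in words for c in w):
--             return 'Error!', None
--         return 'C++', words
--     if not name[0].islower():
--         return 'Error!', None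
--     words = []
--     cur = name[0]
--     for c in name[1:]:
--         if c.isupper():
--             words.append(cur)
--             cur = c
--         else:
--             cur += c
--     words.append(cur)
--     return 'java', words
-- ===== Notes on version B (the rewrite author's own statement) =====
-- stated objective: simpler
-- what changed: The camelCase branch builds words in one streaming pass with a running word buffer (flush before each uppercase letter) instead of first collecting an index table of uppercase positions and then re-slicing the string; validity is checked with startswith/endswith and the uppercase scan is a single any over the split words.
import Mathlib
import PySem

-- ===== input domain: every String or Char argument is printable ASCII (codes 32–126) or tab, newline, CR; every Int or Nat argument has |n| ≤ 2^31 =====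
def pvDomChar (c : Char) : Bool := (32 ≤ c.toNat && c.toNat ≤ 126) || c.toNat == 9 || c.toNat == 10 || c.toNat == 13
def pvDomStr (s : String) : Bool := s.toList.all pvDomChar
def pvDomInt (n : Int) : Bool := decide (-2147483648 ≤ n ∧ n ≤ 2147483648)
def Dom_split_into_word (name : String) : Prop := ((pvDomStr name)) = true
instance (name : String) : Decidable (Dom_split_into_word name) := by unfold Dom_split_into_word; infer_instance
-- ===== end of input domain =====

-- B replaces A's index-table-plus-slicing camelCase split by a single streaming pass with a word buffer (simpler decomposition; same asymptotic cost).

-- ===== PORT A =====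
-- port of helper is_valid (raises on "" in Python; "" is outside Pre_, default ' ' is never read there)
def pvIsValid (cs : List Char) : Bool :=
  if ((PySem.List.pyGet? cs 0).getD ' ') == '_' then false
  else if ((PySem.List.pyGet? cs (-1)).getD ' ') == '_' then false
  else true

def split_into_word (name : String) : String × Option (List String) :=
  let cs := name.toList
  if !pvIsValid cs then ("Error!", none)
  else if PySem.Chars.isIn ['_'] cs then
    let tmp := PySem.Chars.splitOn cs ['_']
    if tmp.contains [] then ("Error!", none)
    else if tmp.any (fun tw => tw.any (fun w => PySem.Chars.isupper w)) then ("Error!", none)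
    else ("C++", some (tmp.map String.ofList))
  else if PySem.Chars.islower ((PySem.List.pyGet? cs 0).getD ' ') then
    let pointers := (List.range cs.length).foldl
      (fun (ps : List Nat) (i : Nat) => if PySem.Chars.isupper (PySem.List.pyGetD cs (i : Int) ' ') then ps ++ [i] else ps)
      ([] : List Nat)
    let st := pointers.foldl
      (fun (st : List (List Char) × Nat) (p : Nat) =>
        (st.1 ++ [PySem.List.slice cs (some (st.2 : Int)) (some (p : Int))], p))
      (([] : List (List Char)), 0)
    let tmp := st.1 ++ [PySem.List.slice cs (some (st.2 : Int)) none]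
    ("java", some (tmp.map String.ofList))
  else ("Error!", none)

-- ===== PORT B =====
def split_into_word_alt (name : String) : String × Option (List String) :=
  let cs := name.toList
  if PySem.Chars.startswith cs ['_'] || PySem.Chars.endswith cs ['_'] then ("Error!", none)
  else if PySem.Chars.isIn ['_'] cs then
    let words := PySem.Chars.splitOn cs ['_']
    if words.any (fun w => w == []) || words.any (fun w => w.any PySem.Chars.isupper) then
      ("Error!", none)
    else ("C++", some (words.map String.ofList))
  else if !PySem.Chars.islower ((PySem.List.pyGet? cs 0).getD ' ') then ("Error!", none)
  else
    let st := (PySem.List.slice cs (some 1) none).foldl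
      (fun (st : List (List Char) × List Char) c =>
        if PySem.Chars.isupper c then (st.1 ++ [st.2], [c]) else (st.1, st.2 ++ [c]))
      (([] : List (List Char)), [(PySem.List.pyGet? cs 0).getD ' '])
    ("java", some ((st.1 ++ [st.2]).map String.ofList))

-- ===== PRECONDITION & SPEC =====
-- Pre_ excludes only the empty string, on which A's is_valid raises IndexError (name[0]).
def Pre_split_into_word (name : String) : Prop := name ≠ ""
instance (name : String) : Decidable (Pre_split_into_word name) := by
  unfold Pre_split_into_word; infer_instance
def pvWitness_split_into_word : String := "helloWorld"

def Spec_split_into_word (name : String) (out : String × Option (List String)) : Prop :=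
  out = split_into_word_alt name
instance (name : String) (out : String × Option (List String)) :
    Decidable (Spec_split_into_word name out) := by
  unfold Spec_split_into_word; infer_instance

-- ===== CLAIM (what is proved, stated in full; the proofs are below) =====
def Claim_equal_split_into_word : Prop :=
  ∀ (name : String), Dom_split_into_word name → Pre_split_into_word name →
    Spec_split_into_word name (split_into_word name)

-- ===== LEMMAS AND PROOFS =====

theorem islower_not_isupper (c : Char) (h : PySem.Chars.islower c = true) :
    PySem.Chars.isupper c = false := by
  simp only [PySem.Chars.islower, PySem.Chars.isupper, Bool.and_eq_true, decide_eq_true_eq,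
    Char.le_def, UInt32.le_iff_toNat_le, Bool.and_eq_false_iff, decide_eq_false_iff_not, not_le] at *
  have h1 : ('Z' : Char).val.toNat < ('a' : Char).val.toNat := by decide
  omega
def goSplit : List Char → List Char → List (List Char)
  | cur, [] => [cur]
  | cur, c :: rest =>
    if PySem.Chars.isupper c then cur :: goSplit [c] rest else goSplit (cur ++ [c]) rest

def buildW (cs : List Char) : Nat → List Nat → List (List Char)
  | pre, [] => [cs.drop pre]
  | pre, p :: ps => ((cs.drop pre).take (p - pre)) :: buildW cs p ps

def upIdx : List Char → List Nat
  | [] => []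
  | c :: t => (if PySem.Chars.isupper c then [0] else []) ++ (upIdx t).map (· + 1)

theorem buildW_foldl (cs : List Char) (ps : List Nat) (acc : List (List Char)) (pre : Nat) :
    (ps.foldl (fun (st : List (List Char) × Nat) (p : Nat) =>
        (st.1 ++ [PySem.List.slice cs (some (st.2 : Int)) (some (p : Int))], p)) (acc, pre)).1
      ++ [PySem.List.slice cs
            (some (((ps.foldl (fun (st : List (List Char) × Nat) (p : Nat) =>
        (st.1 ++ [PySem.List.slice cs (some (st.2 : Int)) (some (p : Int))], p)) (acc, pre)).2 : Nat) : Int)) none]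
    = acc ++ buildW cs pre ps := by
  induction ps generalizing acc pre with
  | nil =>
    simp [buildW, PySem.List.slice_from cs (Int.natCast_nonneg pre)]
  | cons p ps ih =>
    rw [List.foldl_cons, ih]
    rw [buildW, PySem.List.slice_toNat cs (Int.natCast_nonneg pre) (Int.natCast_nonneg p)]
    simp

theorem goSplit_foldl (t : List Char) (acc : List (List Char)) (cur : List Char) :
    (t.foldl (fun (st : List (List Char) × List Char) c =>
        if PySem.Chars.isupper c then (st.1 ++ [st.2], [c]) else (st.1, st.2 ++ [c])) (acc, cur)).1
      ++ [(t.foldl (fun (st : List (List Char) × List Char) c =>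
        if PySem.Chars.isupper c then (st.1 ++ [st.2], [c]) else (st.1, st.2 ++ [c])) (acc, cur)).2]
    = acc ++ goSplit cur t := by
  induction t generalizing acc cur with
  | nil => simp [goSplit]
  | cons c t ih =>
    rw [List.foldl_cons, goSplit]
    split <;> simp_all

theorem goSplit_clean_append (w rest cur : List Char)
    (hw : ∀ c ∈ w, PySem.Chars.isupper c = false) :
    goSplit cur (w ++ rest) = goSplit (cur ++ w) rest := by
  induction w generalizing cur with
  | nil => simp
  | cons c w ih =>
    rw [List.cons_append, goSplit, if_neg (by simp [hw c (by simp)])]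
    rw [ih _ (fun x hx => hw x (by simp [hx]))]
    simp

theorem upIdx_clean_append (w d : List Char) (hw : ∀ c ∈ w, PySem.Chars.isupper c = false) :
    upIdx (w ++ d) = (upIdx d).map (· + w.length) := by
  induction w with
  | nil => simp
  | cons c w ih =>
    rw [List.cons_append, upIdx, if_neg (by simp [hw c (by simp)])]
    rw [ih (fun x hx => hw x (by simp [hx]))]
    simp [Function.comp_def]
    intro a _
    omega

theorem buildW_shift (cs : List Char) (ps : List Nat) (a k : Nat) :
    buildW cs (a + k) (ps.map (· + k)) = buildW (cs.drop k) a ps := by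
  induction ps generalizing a with
  | nil => simp [buildW, List.drop_drop, Nat.add_comm]
  | cons p ps ih =>
    rw [List.map_cons, buildW, buildW, ih]
    rw [List.drop_drop]
    have h1 : p + k - (a + k) = p - a := by omega
    have h2 : a + k = k + a := by omega
    rw [h1, h2]


theorem goSplit_no_upper (t cur : List Char) (ht : ∀ c ∈ t, PySem.Chars.isupper c = false) :
    goSplit cur t = [cur ++ t] := by
  induction t generalizing cur with
  | nil => simp [goSplit]
  | cons c t ih =>
    rw [goSplit, if_neg (by simp [ht c (by simp)])]
    rw [ih _ (fun x hx => ht x (by simp [hx]))]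
    simp

theorem buildW_eq_goSplit (n : Nat) : ∀ (h : Char) (t : List Char), (h :: t).length ≤ n →
    buildW (h :: t) 0 ((upIdx t).map (· + 1)) = goSplit [h] t := by
  induction n with
  | zero => intro h t hlen; simp at hlen
  | succ n ih =>
    intro h t hlen
    obtain ⟨w, d, hdec, hwclean, hdprop⟩ :
        ∃ w d, t = w ++ d ∧ (∀ c ∈ w, PySem.Chars.isupper c = false) ∧
          (∀ c v, d = c :: v → PySem.Chars.isupper c = true) := by
      refine ⟨t.takeWhile (fun c => !PySem.Chars.isupper c),
        t.dropWhile (fun c => !PySem.Chars.isupper c),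
        (List.takeWhile_append_dropWhile).symm, ?_, ?_⟩
      · intro c hc
        simpa using List.mem_takeWhile_imp hc
      · intro c v hcv
        have := List.head?_dropWhile_not (p := fun c => !PySem.Chars.isupper c) (l := t)
        rw [hcv] at this
        simpa using this
    subst hdec
    cases d with
    | nil =>
      rw [List.append_nil]
      rw [show upIdx w = (upIdx ([] : List Char)).map (· + w.length) from by
        simpa using upIdx_clean_append w [] hwclean]
      simp only [upIdx, List.map_nil]
      rw [buildW, goSplit_no_upper w [h] hwclean]
      simp
    | cons c v =>
      have hcup : PySem.Chars.isupper c = true := hdprop c v rfl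
      rw [upIdx_clean_append w (c :: v) hwclean, upIdx, if_pos hcup]
      simp only [List.map_map, List.map_cons, List.singleton_append,
        Function.comp_def]
      rw [buildW]
      simp only [Nat.zero_add, Nat.sub_zero, List.drop_zero]
      have htake : List.take (w.length + 1) (h :: (w ++ c :: v)) = h :: w := by
        rw [List.take_succ_cons, List.take_left]
      rw [htake]
      have hmapeq : (upIdx v).map (fun x => x + 1 + w.length + 1)
          = ((upIdx v).map (· + 1)).map (· + (w.length + 1)) := by
        rw [List.map_map]
        refine List.map_congr_left ?_
        intro a _
        simp
        omega
      rw [hmapeq]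
      have hshift := buildW_shift (h :: (w ++ c :: v)) ((upIdx v).map (· + 1)) 0 (w.length + 1)
      rw [Nat.zero_add] at hshift
      rw [hshift]
      have hdrop : List.drop (w.length + 1) (h :: (w ++ c :: v)) = c :: v := by
        rw [List.drop_succ_cons, List.drop_left]
      rw [hdrop]
      have hlen2 : (c :: v).length ≤ n := by
        simp only [List.length_cons, List.length_append] at hlen ⊢
        omega
      rw [ih c v hlen2]
      rw [goSplit_clean_append w (c :: v) [h] hwclean, goSplit, if_pos hcup]
      simp

theorem filter_range_eq_upIdx (cs : List Char) :
    (List.range cs.length).filter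
      (fun (i : Nat) => PySem.Chars.isupper (PySem.List.pyGetD cs ((i : Nat) : Int) ' ')) = upIdx cs := by
  induction cs with
  | nil => rfl
  | cons c t ih =>
    rw [List.length_cons, List.range_succ_eq_map, List.filter_cons, List.filter_map]
    simp only [pysem, List.getD_cons_zero, Function.comp_def, Nat.cast_zero]
    rw [upIdx, ← ih]
    simp only [pysem, List.getD_cons_succ]
    split <;> simp

theorem pyGet?_neg_one (h : Char) (t : List Char) :
    PySem.List.pyGet? (h :: t) (-1) = (h :: t).getLast? := by
  simp [PySem.List.pyGet?, PySem.List.pyIdx?, List.getLast?_eq_getElem?]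

theorem startswith_underscore (h : Char) (t : List Char) :
    PySem.Chars.startswith (h :: t) ['_'] = (h == '_') := by
  simp [PySem.Chars.startswith, List.isPrefixOf, eq_comm]

theorem endswith_underscore (cs : List Char) :
    PySem.Chars.endswith cs ['_'] = true ↔ cs.getLast? = some '_' := by
  rw [PySem.Chars.endswith_iff]
  constructor
  · rintro ⟨r, rfl⟩; simp
  · intro hg
    obtain ⟨l', rfl⟩ := List.getLast?_eq_some_iff.mp hg
    exact ⟨l', rfl⟩

theorem any_empty_eq_contains (tmp : List (List Char)) :
    tmp.any (fun w => w == []) = tmp.contains [] := by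
  rw [Bool.eq_iff_iff]
  simp [List.isEmpty_iff]

-- ===== VERDICT (by name: the statement is the Claim_ definition above) =====
theorem split_into_word_spec : Claim_equal_split_into_word := by
  intro name _ hpre
  unfold Spec_split_into_word split_into_word split_into_word_alt
  have hne : name.toList ≠ [] := fun hh => hpre (by ext1; simp [hh])
  obtain ⟨h, t, hcs⟩ : ∃ h t, name.toList = h :: t := by
    cases hx : name.toList with
    | nil => exact absurd hx hne
    | cons a b => exact ⟨a, b, rfl⟩
  rw [hcs]
  obtain ⟨z, hz⟩ : ∃ z, (h :: t).getLast? = some z :=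
    ⟨_, List.getLast?_eq_some_getLast (by simp)⟩
  have hget0 : (PySem.List.pyGet? (h :: t) 0).getD ' ' = h := by simp [pysem]
  have hvalid : pvIsValid (h :: t) = !((h == '_') || (z == '_')) := by
    unfold pvIsValid
    rw [hget0, pyGet?_neg_one, hz]
    by_cases hh : h = '_' <;> by_cases hzz : z = '_' <;> simp [hh, hzz]
  have hends : PySem.Chars.endswith (h :: t) ['_'] = (z == '_') := by
    rw [Bool.eq_iff_iff, endswith_underscore, hz, beq_iff_eq]
    simp
  simp only [hvalid, startswith_underscore, hends]
  by_cases hh : (h == '_') || (z == '_')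
  · simp [hh]
  · simp only [hh, Bool.not_false, Bool.false_eq_true, if_false]
    by_cases hin : PySem.Chars.isIn ['_'] (h :: t) = true
    · -- C++ branch
      simp only [hin, if_true]
      rw [any_empty_eq_contains]
      by_cases hc : [] ∈ PySem.Chars.splitOn (h :: t) ['_']
      · have hc' : (PySem.Chars.splitOn (h :: t) ['_']).contains [] = true := by simpa using hc
        simp only [hc', Bool.true_or]
        simp
      · have hc' : (PySem.Chars.splitOn (h :: t) ['_']).contains [] = false := by simpa using hc
        simp only [hc', Bool.false_or, Bool.false_eq_true, if_false]
        rfl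
    · simp only [Bool.not_eq_true] at hin
      simp only [hin, Bool.false_eq_true, if_false]
      rw [hget0]
      by_cases hlow : PySem.Chars.islower h = true
      · -- java branch
        simp only [hlow, if_true, Bool.not_true, Bool.false_eq_true, if_false]
        congr 1
        congr 1
        congr 1
        -- A's words = B's words
        have hA := buildW_foldl (h :: t)
          ((List.range (h :: t).length).foldl
            (fun (ps : List Nat) (i : Nat) =>
              if PySem.Chars.isupper (PySem.List.pyGetD (h :: t) (i : Int) ' ') then ps ++ [i] else ps)
            ([] : List Nat)) [] 0
        have hptr : (List.range (h :: t).length).foldl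
            (fun (ps : List Nat) (i : Nat) =>
              if PySem.Chars.isupper (PySem.List.pyGetD (h :: t) (i : Int) ' ') then ps ++ [i] else ps)
            ([] : List Nat) = (upIdx t).map (· + 1) := by
          rw [show (fun (ps : List Nat) (i : Nat) =>
              if PySem.Chars.isupper (PySem.List.pyGetD (h :: t) (i : Int) ' ') then ps ++ [i] else ps)
            = (fun (acc : List Nat) (x : Nat) =>
              if (fun (i : Nat) => PySem.Chars.isupper (PySem.List.pyGetD (h :: t) ((i : Nat) : Int) ' ')) x
              then acc ++ [(id x)] else acc) from rfl]
          rw [PySem.List.foldl_append_if]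
          rw [List.nil_append, List.map_id, filter_range_eq_upIdx]
          rw [upIdx, islower_not_isupper h hlow]
          simp
        rw [hptr] at hA
        rw [hptr, hA, List.nil_append]
        rw [buildW_eq_goSplit (h :: t).length h t (le_refl _)]
        have hB := goSplit_foldl (PySem.List.slice (h :: t) (some 1) none) [] [h]
        rw [List.nil_append] at hB
        rw [PySem.List.slice_from (h :: t) (by norm_num : (0:Int) ≤ 1)] at hB ⊢
        simp only [Int.toNat_one, List.drop_succ_cons, List.drop_zero] at hB ⊢
        rw [hB]
      · simp only [Bool.not_eq_true] at hlow
        simp [hlow]
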